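-- pv_equiv track=rewrite | github.com/AshokKumarAK/HackerRank-Solutions-using-Python | Flatland Space Stations.py | calc
-- ===== SOURCE A (Python) =====
-- def calc(n, arr):
--     dp = [0] * n
--     for i in range(n):
--         if arr[i] == 1:
--             dp[i] = 0
--         else:
--             if i == 0:
--                 dp[i] = 10**9
--             else:
--                 dp[i] = dp[i - 1] + 1
--     return dp
-- ===== SOURCE B (Python) =====
-- def calc(n, arr):
--     m = max(n, 0)
--     out = []
--     p = -10**9  # virtual station far to the left
--     for q in [i for i, v in enumerate(arr[:m]) if v == 1] + [m]:
--         out.extend(i - p for i in range(max(p, 0), q))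
--         p = q
--     return out
-- ===== Notes on version B (the rewrite author's own statement) =====
-- stated objective: alternative
-- what changed: B collects the station positions in one pass and then emits the output segment-by-segment between consecutive stations (distance = index - previous station, with a virtual station at -10^9), instead of A's preallocated dp array filled by the per-index recurrence dp[i-1]+1.
import Mathlib
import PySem

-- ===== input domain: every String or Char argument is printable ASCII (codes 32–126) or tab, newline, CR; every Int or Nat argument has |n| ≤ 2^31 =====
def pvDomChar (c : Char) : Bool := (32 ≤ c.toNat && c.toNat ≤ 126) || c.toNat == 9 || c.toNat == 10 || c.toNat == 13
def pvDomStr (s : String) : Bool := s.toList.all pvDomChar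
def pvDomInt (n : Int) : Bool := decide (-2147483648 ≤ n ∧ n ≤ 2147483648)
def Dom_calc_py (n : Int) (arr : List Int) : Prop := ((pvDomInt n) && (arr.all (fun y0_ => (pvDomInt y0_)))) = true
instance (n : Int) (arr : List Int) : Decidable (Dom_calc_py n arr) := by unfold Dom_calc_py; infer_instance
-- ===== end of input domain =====

-- B replaces A's per-index dp[i-1]+1 recurrence by collecting the station positions once and
-- filling the output segment-by-segment between consecutive stations (objective: alternative).

-- ===== PORT A =====
-- literal port of Source A: dp = [0]*n, then for i in range(n) mutate dp[i];
-- arr[i] / dp[i-1] are in range under Pre_ (the pyGetD/pySetD defaults are never consulted there)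
def calc_py (n : Int) (arr : List Int) : List Int :=
  (PySem.List.pyRange 0 n 1).foldl
    (fun dp i =>
      if PySem.List.pyGetD arr i 0 = 1 then PySem.List.pySetD dp i 0
      else if i = 0 then PySem.List.pySetD dp i (10 ^ 9)
      else PySem.List.pySetD dp i (PySem.List.pyGetD dp (i - 1) 0 + 1))
    (List.replicate n.toNat 0)

-- ===== PORT B =====
-- literal port of Source B: station positions of arr[:m] once, then one output segment per station
-- (virtual station -10^9 in front, segment end m behind)
def calc_py_alt (n : Int) (arr : List Int) : List Int :=
  let m : Int := max n 0
  let stations : List Int :=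
    (PySem.List.enumerate (PySem.List.slice arr none (some m)) 0).filterMap
      (fun iv => if iv.2 = 1 then some iv.1 else none)
  ((stations ++ [m]).foldl
    (fun s q => (s.1 ++ (PySem.List.pyRange (max s.2 0) q 1).map (fun i => i - s.2), q))
    ([], -(10 ^ 9))).1

-- ===== PRECONDITION & SPEC =====
-- Pre_ excludes exactly the inputs where Python A raises IndexError: n > len(arr).
def Pre_calc_py (n : Int) (arr : List Int) : Prop := n ≤ (arr.length : Int)
instance (n : Int) (arr : List Int) : Decidable (Pre_calc_py n arr) := by unfold Pre_calc_py; infer_instance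
def pvWitness_calc_py : Int × List Int := (5, [0, 1, 0, 0, 1])
def Spec_calc_py (n : Int) (arr : List Int) (out : List Int) : Prop := out = calc_py_alt n arr
instance (n : Int) (arr : List Int) (out : List Int) : Decidable (Spec_calc_py n arr out) := by unfold Spec_calc_py; infer_instance

-- ===== CLAIM (what is proved, stated in full; the proofs are below) =====
def Claim_equal_calc_py : Prop := ∀ (n : Int) (arr : List Int), Dom_calc_py n arr → Pre_calc_py n arr → Spec_calc_py n arr (calc_py n arr)

-- ===== LEMMAS AND PROOFS =====

-- position of the nearest station at or left of index i (the virtual station -10^9 if none)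
def lsta (arr : List Int) : Nat → Int
  | 0 => if arr.getD 0 0 = 1 then 0 else -(10 ^ 9)
  | i + 1 => if arr.getD (i + 1) 0 = 1 then ((i : Int) + 1) else lsta arr i

-- positions (from offset s) of the 1-entries of a list
def stIdx : List Int → Int → List Int
  | [], _ => []
  | v :: t, s => if v = 1 then s :: stIdx t (s + 1) else stIdx t (s + 1)

-- one output segment of B: indices max(p,0) ≤ i < q, value i - p
def segB (p q : Int) : List Int := (PySem.List.pyRange (max p 0) q 1).map (fun i => i - p)

-- the list Source B's loop produces from previous-station p and the remaining segment ends
def chainB : Int → List Int → List Int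
  | _, [] => []
  | p, q :: t => segB p q ++ chainB q t

theorem stIdx_mem (l : List Int) (s : Int) (x : Int) :
    x ∈ stIdx l s ↔ ∃ k : Nat, k < l.length ∧ l.getD k 0 = 1 ∧ x = s + k := by
  induction l generalizing s x with
  | nil => simp [stIdx]
  | cons v t ih =>
    simp only [stIdx]
    constructor
    · intro hx
      by_cases hv : v = 1
      · simp [hv] at hx
        rcases hx with rfl | hx
        · exact ⟨0, by simp [hv]⟩
        · rcases (ih (s + 1) x).mp hx with ⟨k, hk, hst, rfl⟩
          exact ⟨k + 1, by simpa using hk, by simpa using hst, by push_cast; ring⟩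
      · simp [hv] at hx
        rcases (ih (s + 1) x).mp hx with ⟨k, hk, hst, rfl⟩
        exact ⟨k + 1, by simpa using hk, by simpa using hst, by push_cast; ring⟩
    · rintro ⟨k, hk, hst, rfl⟩
      cases k with
      | zero =>
        simp at hst
        simp [hst]
      | succ k =>
        have he : s + ((k + 1 : Nat) : Int) = (s + 1) + (k : Int) := by push_cast; ring
        have hx : (s + 1) + (k : Int) ∈ stIdx t (s + 1) :=
          (ih (s + 1) ((s + 1) + (k : Int))).mpr ⟨k, by simpa using hk, by simpa using hst, rfl⟩
        rw [he]
        by_cases hv : v = 1 <;> simp [hv]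
        · right; exact hx
        · exact hx
theorem stIdx_pairwise (l : List Int) (s : Int) : (stIdx l s).Pairwise (· < ·) := by
  induction l generalizing s with
  | nil => simp [stIdx]
  | cons v t ih =>
    by_cases hv : v = 1 <;> simp [stIdx, hv]
    · refine ⟨?_, ih (s + 1)⟩
      intro x hx
      rcases (stIdx_mem t (s + 1) x).mp hx with ⟨k, -, -, rfl⟩
      omega
    · exact ih (s + 1)

theorem lsta_eq_sent (arr : List Int) (i : Nat)
    (h : ∀ j : Nat, j ≤ i → arr.getD j 0 ≠ 1) : lsta arr i = -(10 ^ 9) := by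
  induction i with
  | zero =>
    simp only [lsta]
    rw [if_neg (h 0 (by omega))]
  | succ i ih =>
    simp only [lsta, h (i + 1) (by omega), if_false]
    exact ih (fun j hj => h j (by omega))

theorem lsta_eq_station (arr : List Int) (j₀ : Nat) (i : Nat)
    (hle : j₀ ≤ i) (hst : arr.getD j₀ 0 = 1)
    (h : ∀ j : Nat, j₀ < j → j ≤ i → arr.getD j 0 ≠ 1) : lsta arr i = (j₀ : Int) := by
  induction i with
  | zero =>
    have : j₀ = 0 := by omega
    subst this
    simp only [lsta]
    rw [if_pos hst]
    simp
  | succ i ih =>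
    rcases Nat.eq_or_lt_of_le hle with heq | hlt
    · subst heq
      simp only [lsta]
      rw [if_pos hst]
      push_cast
      ring
    · have hne : arr.getD (i + 1) 0 ≠ 1 := h (i + 1) (by omega) (by omega)
      simp only [lsta, hne, if_false]
      exact ih (by omega) (fun j hj1 hj2 => h j hj1 (by omega))

theorem foldB_fst (L : List Int) (acc : List Int) (p : Int) :
    ((L.foldl (fun s q => (s.1 ++ (PySem.List.pyRange (max s.2 0) q 1).map (fun i => i - s.2), q))
      (acc, p))).1 = acc ++ chainB p L := by
  induction L generalizing acc p with
  | nil => simp [chainB]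
  | cons q t ih => simp [chainB, segB, ih, List.append_assoc]
theorem getD_map_range_f (arr : List Int) (k j : Nat) (h : j < k) :
    (((List.range k).map (fun (j : Nat) => (j : Int) - lsta arr j)).getD j 0)
      = (j : Int) - lsta arr j := by
  rw [List.getD_eq_getElem?_getD]
  simp [List.getElem?_map, List.getElem?_range h]

theorem calcA_inv (arr : List Int) (m : Nat) (k : Nat) (hk : k ≤ m) :
    (List.range k).foldl
      (fun dp i =>
        if arr.getD i 0 = 1 then dp.set i 0
        else if i = 0 then dp.set i (10 ^ 9)
        else dp.set i (dp.getD (i - 1) 0 + 1))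
      (List.replicate m 0)
    = ((List.range k).map (fun (j : Nat) => (j : Int) - lsta arr j)) ++ List.replicate (m - k) 0 := by
  induction k with
  | zero => simp
  | succ k ih =>
    have hkm : k < m := by omega
    rw [List.range_succ, List.foldl_append, ih (by omega)]
    simp only [List.foldl_cons, List.foldl_nil]
    set f : Nat → Int := fun (j : Nat) => (j : Int) - lsta arr j with hf
    set P : List Int := (List.range k).map f with hP
    have hlenP : P.length = k := by simp [hP]
    have hrep : List.replicate (m - k) (0 : Int) = 0 :: List.replicate (m - (k + 1)) 0 := by
      have h2 : m - k = (m - (k + 1)) + 1 := by omega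
      rw [h2, List.replicate_succ]
    have hset : ∀ v : Int,
        (P ++ List.replicate (m - k) 0).set k v = P ++ v :: List.replicate (m - (k + 1)) 0 := by
      intro v
      rw [hrep, ← hlenP, List.set_append]
      simp
    have hout : ∀ v : Int, v = f k →
        P ++ v :: List.replicate (m - (k + 1)) 0
          = (List.range (k + 1)).map f ++ List.replicate (m - (k + 1)) 0 := by
      intro v hv
      rw [List.range_succ, List.map_append, hv]
      simp [hP]
    by_cases hst : arr.getD k 0 = 1
    · have hl : lsta arr k = (k : Int) :=
        lsta_eq_station arr k k le_rfl hst (fun j h1 h2 => absurd h2 (by omega))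
      have h0 : (0 : Int) = f k := by simp [hf, hl]
      rw [if_pos hst, hset, hout 0 h0, List.range_succ]
    · rw [if_neg hst]
      by_cases hk0 : k = 0
      · subst hk0
        have hl : lsta arr 0 = -(10 ^ 9) := by
          simp only [lsta]
          rw [if_neg hst]
        have h0 : ((10 : Int) ^ 9) = f 0 := by simp [hf, hl]
        rw [if_pos rfl, hset, hout _ h0, List.range_succ]
      · rw [if_neg hk0]
        have hgd : (P ++ List.replicate (m - k) 0).getD (k - 1) 0 = f (k - 1) := by
          rw [List.getD_append _ _ _ _ (by omega), hP]
          exact getD_map_range_f arr k (k - 1) (by omega)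
        have hv : f (k - 1) + 1 = f k := by
          obtain ⟨j, rfl⟩ : ∃ j, k = j + 1 := ⟨k - 1, by omega⟩
          have hls : lsta arr (j + 1) = lsta arr j := by
            simp only [lsta]
            rw [if_neg hst]
          simp only [hf, Nat.add_sub_cancel, hls]
          push_cast
          ring
        rw [hgd, hset, hout _ hv, List.range_succ]
theorem calcA_eq (n : Int) (arr : List Int) :
    calc_py n arr = (List.range n.toNat).map (fun (j : Nat) => (j : Int) - lsta arr j) := by
  unfold calc_py
  rw [PySem.List.pyRange_one, List.foldl_map, show ((n : Int) - 0) = n from by ring]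
  have hbody : (fun (dp : List Int) (k : Nat) =>
        if PySem.List.pyGetD arr ((0 : Int) + (k : Int)) 0 = 1 then
          PySem.List.pySetD dp ((0 : Int) + (k : Int)) 0
        else if ((0 : Int) + (k : Int)) = 0 then PySem.List.pySetD dp ((0 : Int) + (k : Int)) (10 ^ 9)
        else PySem.List.pySetD dp ((0 : Int) + (k : Int))
          (PySem.List.pyGetD dp (((0 : Int) + (k : Int)) - 1) 0 + 1))
      = (fun (dp : List Int) (k : Nat) =>
        if arr.getD k 0 = 1 then dp.set k 0
        else if k = 0 then dp.set k (10 ^ 9)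
        else dp.set k (dp.getD (k - 1) 0 + 1)) := by
    funext dp k
    rw [show ((0 : Int) + (k : Int)) = (k : Int) from by ring]
    simp only [PySem.List.pyGetD_natCast, PySem.List.pySetD_natCast, Int.natCast_eq_zero]
    by_cases hk0 : k = 0
    · subst hk0
      simp
    · rw [show ((k : Int) - 1) = ((k - 1 : Nat) : Int) from by omega]
      simp only [PySem.List.pyGetD_natCast]
  rw [hbody]
  simpa using calcA_inv arr n.toNat n.toNat le_rfl
theorem sent_lt (j : Nat) : -((10 : Int) ^ 9) < (j : Int) :=
  lt_of_lt_of_le (by norm_num) (Int.natCast_nonneg j)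

theorem segB_eq (arr : List Int) (p : Int) (e : Nat)
    (hse : (max p 0).toNat ≤ e)
    (hls : ∀ j : Nat, (max p 0).toNat ≤ j → j < e → lsta arr j = p) :
    segB p (e : Int)
      = (List.range' (max p 0).toNat (e - (max p 0).toNat)).map
          (fun (j : Nat) => (j : Int) - lsta arr j) := by
  set s := (max p 0).toNat with hs
  have hcast : ((s : Nat) : Int) = max p 0 := Int.toNat_of_nonneg (le_max_right _ _)
  unfold segB
  rw [← hcast, PySem.List.pyRange_one,
    show ((e : Int) - (s : Int)).toNat = e - s from by omega,
    List.range'_eq_map_range, List.map_map, List.map_map]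
  apply List.map_congr_left
  intro k hk
  have hk' : k < e - s := List.mem_range.mp hk
  have hls' : lsta arr (s + k) = p := hls (s + k) (by omega) (by omega)
  simp only [Function.comp_apply, hls']
  push_cast
  ring

theorem chainB_eq (arr : List Int) (m : Nat) (S : List Int) (p : Int)
    (hpw : S.Pairwise (· < ·))
    (hmem : ∀ x, x ∈ S ↔ ∃ j : Nat, j < m ∧ arr.getD j 0 = 1 ∧ p < (j : Int) ∧ x = (j : Int))
    (hp : p = -(10 ^ 9) ∨ ∃ j₀ : Nat, p = (j₀ : Int) ∧ arr.getD j₀ 0 = 1 ∧ j₀ < m) :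
    chainB p (S ++ [(m : Int)])
      = (List.range' (max p 0).toNat (m - (max p 0).toNat)).map
          (fun (j : Nat) => (j : Int) - lsta arr j) := by
  induction S generalizing p with
  | nil =>
    have hnost : ∀ j : Nat, j < m → p < (j : Int) → arr.getD j 0 ≠ 1 := by
      intro j h1 h2 hst
      exact (List.not_mem_nil (a := ((j : Int)))) ((hmem _).mpr ⟨j, h1, hst, h2, rfl⟩)
    have hse : (max p 0).toNat ≤ m := by
      rcases hp with rfl | ⟨j₀, rfl, _, hj₀⟩
      · norm_num
      · simp [Int.toNat_natCast]
        omega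
    have hls : ∀ j : Nat, (max p 0).toNat ≤ j → j < m → lsta arr j = p := by
      intro j hj1 hj2
      rcases hp with rfl | ⟨j₀, rfl, hst₀, hj₀⟩
      · exact lsta_eq_sent arr j (fun j' hj' => hnost j' (by omega) (sent_lt j'))
      · have hj₀j : j₀ ≤ j := by
          simp [Int.toNat_natCast] at hj1
          omega
        exact lsta_eq_station arr j₀ j hj₀j hst₀
          (fun j' h1 h2 => hnost j' (by omega) (by exact_mod_cast h1))
    simp only [List.nil_append, chainB]
    rw [List.append_nil]
    exact segB_eq arr p m hse hls
  | cons q t ih =>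
    obtain ⟨j₁, hj₁m, hst₁, hpj₁, rfl⟩ := (hmem q).mp List.mem_cons_self
    have hqt : ∀ x ∈ t, ((j₁ : Int)) < x := (List.pairwise_cons.mp hpw).1
    have hmem' : ∀ x, x ∈ t ↔ ∃ j : Nat, j < m ∧ arr.getD j 0 = 1 ∧ ((j₁ : Int)) < (j : Int) ∧ x = (j : Int) := by
      intro x
      constructor
      · intro hx
        obtain ⟨j, h1, h2, h3, rfl⟩ := (hmem _).mp (List.mem_cons_of_mem _ hx)
        exact ⟨j, h1, h2, hqt _ hx, rfl⟩
      · rintro ⟨j, h1, h2, h3, rfl⟩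
        have hin : ((j : Int)) ∈ ((j₁ : Int)) :: t :=
          (hmem _).mpr ⟨j, h1, h2, lt_trans hpj₁ h3, rfl⟩
        rcases List.mem_cons.mp hin with heq | hmem_t
        · omega
        · exact hmem_t
    have hih := ih ((j₁ : Int)) (List.Pairwise.of_cons hpw) hmem' (Or.inr ⟨j₁, rfl, hst₁, hj₁m⟩)
    have hnost : ∀ j : Nat, j < j₁ → p < (j : Int) → arr.getD j 0 ≠ 1 := by
      intro j h1 h2 hst
      have hin : ((j : Int)) ∈ ((j₁ : Int)) :: t :=
        (hmem _).mpr ⟨j, by omega, hst, h2, rfl⟩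
      rcases List.mem_cons.mp hin with heq | hmem_t
      · omega
      · have := hqt _ hmem_t
        omega
    have hse : (max p 0).toNat ≤ j₁ := by
      rcases hp with rfl | ⟨j₀, rfl, _, _⟩
      · norm_num
      · simp [Int.toNat_natCast]
        omega
    have hls : ∀ j : Nat, (max p 0).toNat ≤ j → j < j₁ → lsta arr j = p := by
      intro j hj1 hj2
      rcases hp with rfl | ⟨j₀, rfl, hst₀, hj₀⟩
      · exact lsta_eq_sent arr j (fun j' hj' => hnost j' (by omega) (sent_lt j'))
      · have hj₀j : j₀ ≤ j := by
          simp [Int.toNat_natCast] at hj1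
          omega
        exact lsta_eq_station arr j₀ j hj₀j hst₀
          (fun j' h1 h2 => hnost j' (by omega) (by exact_mod_cast h1))
    have hmax₁ : (max ((j₁ : Int)) 0).toNat = j₁ := by
      simp [Int.toNat_natCast]
    simp only [List.cons_append, chainB]
    rw [segB_eq arr p j₁ hse hls, hih, hmax₁, ← List.map_append]
    congr 1
    rw [show List.range' j₁ (m - j₁)
        = List.range' ((max p 0).toNat + (j₁ - (max p 0).toNat)) (m - j₁) from by
          congr 1
          omega,
      List.range'_append_1]
    congr 1
    omega

theorem filterMap_enumerate_eq_stIdx (l : List Int) (s : Int) :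
    (PySem.List.enumerate l s).filterMap (fun iv => if iv.2 = 1 then some iv.1 else none)
      = stIdx l s := by
  induction l generalizing s with
  | nil => simp [PySem.List.enumerate_nil, stIdx]
  | cons v t ih =>
    rw [PySem.List.enumerate_cons, List.filterMap_cons]
    by_cases hv : v = 1 <;> simp [stIdx, hv, ih]

theorem getD_take (arr : List Int) (m k : Nat) (hk : k < m) :
    (arr.take m).getD k 0 = arr.getD k 0 := by
  rw [List.getD_eq_getElem?_getD, List.getD_eq_getElem?_getD, List.getElem?_take_of_lt hk]

theorem calcB_eq (n : Int) (arr : List Int) :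
    calc_py_alt n arr = (List.range n.toNat).map (fun (j : Nat) => (j : Int) - lsta arr j) := by
  unfold calc_py_alt
  simp only
  rw [← Int.ofNat_toNat n]
  set m := n.toNat with hm
  rw [PySem.List.slice_to_natCast, filterMap_enumerate_eq_stIdx, foldB_fst]
  rw [List.nil_append]
  have hmem : ∀ x, x ∈ stIdx (arr.take m) 0
      ↔ ∃ j : Nat, j < m ∧ arr.getD j 0 = 1 ∧ -((10 : Int) ^ 9) < (j : Int) ∧ x = (j : Int) := by
    intro x
    rw [stIdx_mem]
    constructor
    · rintro ⟨k, hk, hst, rfl⟩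
      have hkm : k < m := by
        have := List.length_take_le m arr
        omega
      rw [getD_take arr m k hkm] at hst
      exact ⟨k, hkm, hst, sent_lt k, by simp⟩
    · rintro ⟨j, hjm, hst, -, rfl⟩
      have hjl : j < arr.length := by
        by_contra hge
        rw [List.getD_eq_default _ _ (by omega)] at hst
        norm_num at hst
      exact ⟨j, by simp [List.length_take]; omega, by rw [getD_take arr m j hjm]; exact hst, by simp⟩
  have := chainB_eq arr m (stIdx (arr.take m) 0) (-((10 : Int) ^ 9))
    (stIdx_pairwise _ _) hmem (Or.inl rfl)
  rw [show chainB (-((10:Int)^9)) (stIdx (arr.take m) 0 ++ [(m : Int)])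
      = (List.range' (max (-((10:Int)^9)) 0).toNat (m - (max (-((10:Int)^9)) 0).toNat)).map
          (fun (j : Nat) => (j : Int) - lsta arr j) from this]
  have hmax : (max (-((10 : Int) ^ 9)) 0).toNat = 0 := by norm_num
  rw [hmax, List.range_eq_range', Nat.sub_zero]

-- ===== VERDICT (by name: the statement is the Claim_ definition above) =====
theorem calc_py_spec : Claim_equal_calc_py := by
  intro n arr _ _
  unfold Spec_calc_py
  rw [calcA_eq, calcB_eq]
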